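-- pv_equiv track=rewrite | github.com/cosmicexplorer/mutation-optimizer | lib/mutation-optimizer.py | find_seq_changes
-- ===== SOURCE A (Python) =====
-- def find_seq_changes(original_seq,optimized_seq,target):        # Compares input and output sequences, and highlights which bases were changed to remove hotspots
--     target=str(target)
--     indices_original=[i for i in range(len(original_seq)) if original_seq.startswith(target, i)]
--     indices_optimized=[i for i in range(len(optimized_seq)) if optimized_seq.startswith(target, i)]
--     change_indices=[]
--     if len(indices_original)>=len(indices_optimized):
--         opt_set=set(indices_optimized)
--         change_indices=[x for x in indices_original if x not in opt_set]
--         '''                                          # for maximizing mutation. Need to change software so does not mistakenly think site eliminated if optimal seq added some hotspot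
--     elif len(indices_original)<len(indices_optimized):
--         orig_set=set(indices_original)
--         change_indices=[x for x in indices_optimized if x not in orig_set]
--         '''
--     return(change_indices)
-- ===== SOURCE B (Python) =====
-- def find_seq_changes(original_seq, optimized_seq, target):
--     target = str(target)
--
--     def occurrences(seq):
--         # jump from match to match with str.find instead of testing every index
--         if not target:
--             return list(range(len(seq)))
--         res = []
--         i = seq.find(target)
--         while i != -1:
--             res.append(i)
--             i = seq.find(target, i + 1)
--         return res
--
--     orig = occurrences(original_seq)
--     opt = occurrences(optimized_seq)
--     if len(orig) < len(opt):
--         return []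
--     # both lists are strictly increasing: merge-style difference, no hash set
--     out = []
--     j = 0
--     for x in orig:
--         while j < len(opt) and opt[j] < x:
--             j += 1
--         if j < len(opt) and opt[j] == x:
--             continue
--         out.append(x)
--     return out
-- ===== Notes on version B (the rewrite author's own statement) =====
-- stated objective: faster
-- what changed: B finds target occurrences by jumping from match to match with str.find instead of testing startswith at every index, and computes the set difference by merging the two sorted occurrence lists with a moving pointer instead of building a hash set.
import Mathlib
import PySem

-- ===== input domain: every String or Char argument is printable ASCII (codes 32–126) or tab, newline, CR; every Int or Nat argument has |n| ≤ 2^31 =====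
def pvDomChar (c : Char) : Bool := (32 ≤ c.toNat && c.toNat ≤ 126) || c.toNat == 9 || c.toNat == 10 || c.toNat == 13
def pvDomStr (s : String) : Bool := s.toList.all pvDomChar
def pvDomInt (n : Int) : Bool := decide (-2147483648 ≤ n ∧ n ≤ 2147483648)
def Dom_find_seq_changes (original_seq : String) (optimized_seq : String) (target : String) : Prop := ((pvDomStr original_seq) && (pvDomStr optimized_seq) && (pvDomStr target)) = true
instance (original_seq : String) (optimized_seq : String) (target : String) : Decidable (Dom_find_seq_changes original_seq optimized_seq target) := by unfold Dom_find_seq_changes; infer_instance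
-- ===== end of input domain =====

-- B replaces A's per-index startswith scan by a str.find jump loop and A's hash-set
-- difference by a merge of the two sorted occurrence lists (objective: faster occurrence scan).

-- ===== PORT A =====
-- ported by hand: Python's s.startswith(t, i) for 0 ≤ i < len(s) tests t as a prefix of s[i:] (exact on that range)
def find_seq_changes (original_seq : String) (optimized_seq : String) (target : String) : List Int :=
  let tl := target.toList
  let indices_original := (PySem.List.pyRange 0 (original_seq.toList.length : Int)).filter
      (fun i => PySem.Chars.startswith (original_seq.toList.drop i.toNat) tl)
  let indices_optimized := (PySem.List.pyRange 0 (optimized_seq.toList.length : Int)).filter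
      (fun i => PySem.Chars.startswith (optimized_seq.toList.drop i.toNat) tl)
  if indices_optimized.length ≤ indices_original.length then
    let opt_set : PySem.Set Int := PySem.Set.ofList indices_optimized
    indices_original.filter (fun x => !(PySem.Set.contains opt_set x))
  else []

-- ===== PORT B =====
-- the 'i = seq.find(target); while i != -1: … i = seq.find(target, i+1)' loop of Source B;
-- fuel only makes the recursion total (len(seq)+1 steps always suffice)
def pvOccLoop (s t : List Char) : Nat → Nat → List Int
  | _, 0 => []
  | start, fuel+1 =>
    let i := PySem.Chars.findFrom s t (start : Int) none
    if i = -1 then [] else i :: pvOccLoop s t (i.toNat + 1) fuel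

-- Source B's occurrences(seq)
def pvOccurrences (s t : List Char) : List Int :=
  if t = [] then (PySem.List.pyRange 0 (s.length : Int))
  else pvOccLoop s t 0 (s.length + 1)

-- Source B's merge-style difference loop: opt plays the role of opt[j:]
def pvDiffMerge : List Int → List Int → List Int
  | _, [] => []
  | opt, x :: xs =>
    match opt.dropWhile (fun y => y < x) with
    | y :: rest => if y = x then pvDiffMerge (y :: rest) xs else x :: pvDiffMerge (y :: rest) xs
    | [] => x :: pvDiffMerge [] xs

def find_seq_changes_alt (original_seq : String) (optimized_seq : String) (target : String) : List Int :=
  let orig := pvOccurrences original_seq.toList target.toList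
  let opt := pvOccurrences optimized_seq.toList target.toList
  if orig.length < opt.length then []
  else pvDiffMerge opt orig

-- ===== PRECONDITION & SPEC =====
def Spec_find_seq_changes (original_seq : String) (optimized_seq : String) (target : String) (out : List Int) : Prop := out = find_seq_changes_alt original_seq optimized_seq target
instance (original_seq : String) (optimized_seq : String) (target : String) (out : List Int) : Decidable (Spec_find_seq_changes original_seq optimized_seq target out) := by unfold Spec_find_seq_changes; infer_instance

-- ===== CLAIM (what is proved, stated in full; the proofs are below) =====
def Claim_equal_find_seq_changes : Prop := ∀ (original_seq : String) (optimized_seq : String) (target : String), Dom_find_seq_changes original_seq optimized_seq target → Spec_find_seq_changes original_seq optimized_seq target (find_seq_changes original_seq optimized_seq target)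

-- ===== LEMMAS AND PROOFS =====

-- the naive (A-side) occurrence positions, as a Nat list
def pvNaive (s t : List Char) : List Nat :=
  (List.range s.length).filter (fun k => PySem.Chars.startswith (s.drop k) t)

lemma pvNaive_sorted (s t : List Char) : (pvNaive s t).Pairwise (· < ·) :=
  List.Pairwise.filter _ List.pairwise_lt_range

-- pick out the least element ≥ start of a strictly sorted list
lemma pvFilter_ge_cons {L : List Nat} {start m : Nat}
    (hs : L.Pairwise (· < ·)) (hm : m ∈ L) (hsm : start ≤ m)
    (hmin : ∀ j ∈ L, start ≤ j → m ≤ j) :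
    L.filter (fun k => start ≤ k) = m :: L.filter (fun k => m + 1 ≤ k) := by
  induction L with
  | nil => cases hm
  | cons a L' ih =>
    rcases List.pairwise_cons.mp hs with ⟨ha, hs'⟩
    by_cases hsa : start ≤ a
    · have hma : m ≤ a := hmin a (List.mem_cons_self) hsa
      have ham : a = m := by
        rcases List.mem_cons.mp hm with h | h
        · omega
        · exact absurd (ha m h) (by omega)
      subst ham
      have h1 : L'.filter (fun k => start ≤ k) = L' := by
        apply List.filter_eq_self.mpr
        intro j hj; have := ha j hj; simp; omega
      have h2 : L'.filter (fun k => decide (a < k)) = L' := by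
        apply List.filter_eq_self.mpr
        intro j hj; have := ha j hj; simp; omega
      simp [hsa, h1]
      exact h2.symm
    · have ham : a ≠ m := by intro h; omega
      have hm' : m ∈ L' := by
        rcases List.mem_cons.mp hm with h | h
        · exact absurd h.symm ham
        · exact h
      have hlt : ¬ a + 1 ≤ a := by omega
      have hstep := ih hs' hm' (fun j hj hsj => hmin j (List.mem_cons_of_mem _ hj) hsj)
      have hma : a < m := by
        rcases List.mem_cons.mp hm with h | h
        · exact absurd h.symm ham
        · exact ha m h
      simp only [List.filter_cons]
      have : ¬ m + 1 ≤ a := by omega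
      simp [hsa, this, hstep]

-- a prefix match at position k ≥ start is an infix of s.drop start
lemma pvPrefix_drop_infix {t s : List Char} {start k : Nat} (hsk : start ≤ k)
    (h : t <+: s.drop k) : t <:+: s.drop start := by
  have : s.drop k = (s.drop start).drop (k - start) := by
    rw [List.drop_drop]; congr 1; omega
  rw [this] at h
  exact h.isInfix.trans (List.drop_suffix _ _).isInfix

-- the find loop collects exactly the naive matches at positions ≥ start
lemma pvOccLoop_eq (s t : List Char) (ht : t ≠ []) :
    ∀ fuel start, start ≤ s.length → s.length + 1 - start ≤ fuel →
      pvOccLoop s t start fuel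
        = ((pvNaive s t).filter (fun k => start ≤ k)).map (fun k : Nat => (k : Int)) := by
  intro fuel
  induction fuel with
  | zero => intro start h1 h2; omega
  | succ fuel ih =>
    intro start h1 h2
    by_cases hneg : PySem.Chars.findFrom s t (start : Int) none = -1
    · rw [pvOccLoop, if_pos hneg]
      have hno : ¬ t <:+: s.drop start :=
        (PySem.Chars.findFrom_natCast_eq_neg_one_iff s t start h1).mp hneg
      have : (pvNaive s t).filter (fun k => start ≤ k) = [] := by
        apply List.filter_eq_nil_iff.mpr
        intro k hk hs
        rcases List.mem_filter.mp hk with ⟨_, hp⟩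
        exact hno (pvPrefix_drop_infix (by simpa using hs)
          ((PySem.Chars.startswith_iff _ _).mp hp))
      rw [this]; rfl
    · obtain ⟨hge, hpref, hmin⟩ := PySem.Chars.findFrom_natCast_spec s t start h1 hneg
      set i := PySem.Chars.findFrom s t (start : Int) none with hi
      have hi0 : 0 ≤ i := le_trans (by exact_mod_cast Int.natCast_nonneg start) hge
      have hsm : start ≤ i.toNat := by omega
      have hmlen : i.toNat < s.length := by
        have : s.drop i.toNat ≠ [] := by
          intro h; rw [h] at hpref; exact ht (List.prefix_nil.mp hpref)
        have := List.length_pos_iff.mpr this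
        simp [List.length_drop] at this; omega
      have hmem : i.toNat ∈ pvNaive s t := by
        apply List.mem_filter.mpr
        exact ⟨List.mem_range.mpr hmlen, (PySem.Chars.startswith_iff _ _).mpr hpref⟩
      have hminL : ∀ j ∈ pvNaive s t, start ≤ j → i.toNat ≤ j := by
        intro j hj hsj
        by_contra hlt
        exact hmin j hsj (by omega)
          ((PySem.Chars.startswith_iff _ _).mp (List.mem_filter.mp hj).2)
      rw [pvOccLoop, if_neg hneg]
      rw [pvFilter_ge_cons (pvNaive_sorted s t) hmem hsm hminL]
      rw [List.map_cons]
      have hrec := ih (i.toNat + 1) (by omega) (by omega)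
      rw [← hi, hrec]
      congr 1
      omega
-- Source B's occurrences equal A's index-comprehension occurrences
lemma pvOccurrences_eq (s t : List Char) :
    pvOccurrences s t = (pvNaive s t).map (fun k : Nat => (k : Int)) := by
  by_cases ht : t = []
  · subst ht
    rw [pvOccurrences, if_pos rfl]
    rw [PySem.List.pyRange_zero_natCast]
    unfold pvNaive
    congr 1
    exact (List.filter_eq_self.mpr (fun k _ => by simp [PySem.Chars.startswith_iff])).symm
  · rw [pvOccurrences, if_neg ht]
    rw [pvOccLoop_eq s t ht (s.length + 1) 0 (by omega) (by omega)]
    congr 1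
    exact List.filter_eq_self.mpr (fun k _ => by simp)

-- A's filtered pyRange IS the casted naive list
lemma pvAList_eq (s t : List Char) :
    (PySem.List.pyRange 0 (s.length : Int)).filter
        (fun i => PySem.Chars.startswith (s.drop i.toNat) t)
      = (pvNaive s t).map (fun k : Nat => (k : Int)) := by
  rw [PySem.List.pyRange_zero_natCast, List.filter_map]
  unfold pvNaive
  congr 1

-- the merge difference equals filtering by non-membership, on strictly sorted lists
lemma pvDiffMerge_eq (orig : List Int) :
    ∀ opt : List Int, opt.Pairwise (· < ·) → orig.Pairwise (· < ·) →
      pvDiffMerge opt orig = orig.filter (fun x => !(opt.contains x)) := by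
  induction orig with
  | nil => intro opt _ _; rfl
  | cons x xs ih =>
    intro opt hopt horig
    rcases List.pairwise_cons.mp horig with ⟨hx, hxs⟩
    have hsub : (opt.dropWhile (fun y => decide (y < x))).Sublist opt := List.dropWhile_sublist _
    have hopt's : (opt.dropWhile (fun y => decide (y < x))).Pairwise (· < ·) := hopt.sublist hsub
    have htw : ∀ z ∈ opt.takeWhile (fun y => decide (y < x)), z < x := by
      intro z hz; simpa using List.mem_takeWhile_imp hz
    have hmem_iff : ∀ z : Int, x ≤ z →
        (z ∈ opt ↔ z ∈ opt.dropWhile (fun y => decide (y < x))) := by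
      intro z hzx
      constructor
      · intro hz
        rw [← List.takeWhile_append_dropWhile (p := fun y => decide (y < x)) (l := opt)] at hz
        rcases List.mem_append.mp hz with h | h
        · exact absurd (htw z h) (by omega)
        · exact h
      · intro hz; exact hsub.subset hz
    have htail : xs.filter (fun z => !(opt.contains z))
        = xs.filter (fun z => !((opt.dropWhile (fun y => decide (y < x))).contains z)) := by
      apply List.filter_congr
      intro z hz
      have h := hmem_iff z (le_of_lt (hx z hz))
      simp [h]
    rcases hdw : opt.dropWhile (fun y => decide (y < x)) with _ | ⟨y, rest⟩
    · -- every element of opt is < x: x and all later elements are absent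
      have hxnot : x ∉ opt := by
        intro hxin
        have := (hmem_iff x le_rfl).mp hxin
        rw [hdw] at this; cases this
      have hih := ih [] List.Pairwise.nil hxs
      rw [hdw] at htail
      have hc : (!opt.contains x) = true := by simp [hxnot]
      simp only [pvDiffMerge, hdw, List.filter_cons]
      rw [hih, ← htail, hc, if_pos rfl]
    · have hyx : ¬ y < x := by
        have hne : opt.dropWhile (fun y => decide (y < x)) ≠ [] := by rw [hdw]; simp
        have hhd := List.head_dropWhile_not (fun y => decide (y < x)) hne
        have h2 : (opt.dropWhile (fun y => decide (y < x))).head hne = y := by simp [hdw]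
        rw [h2] at hhd; simpa using hhd
      rw [hdw] at htail
      have hih := ih (y :: rest) (hdw ▸ hopt's) hxs
      by_cases hxy : y = x
      · have hxin : x ∈ opt := by
          apply (hmem_iff x le_rfl).mpr
          rw [hdw, hxy]; exact List.mem_cons_self
        have hc : (!opt.contains x) = false := by simp [hxin]
        simp only [pvDiffMerge, hdw, List.filter_cons, if_pos hxy]
        rw [hih, ← htail, hc, if_neg Bool.false_ne_true]
      · have hxnot : x ∉ opt := by
          intro hxin
          have hin := (hmem_iff x le_rfl).mp hxin
          rw [hdw] at hin
          rcases List.mem_cons.mp hin with h | h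
          · exact hxy h.symm
          · have := (List.pairwise_cons.mp (hdw ▸ hopt's)).1 x h
            omega
        have hc : (!opt.contains x) = true := by simp [hxnot]
        simp only [pvDiffMerge, hdw, List.filter_cons, if_neg hxy]
        rw [hih, ← htail, hc, if_pos rfl]

lemma pvCast_sorted (L : List Nat) (h : L.Pairwise (· < ·)) :
    (L.map (fun k : Nat => (k : Int))).Pairwise (· < ·) := by
  rw [List.pairwise_map]
  exact h.imp (by intro a b; exact_mod_cast id)

-- ===== VERDICT (by name: the statement is the Claim_ definition above) =====
theorem find_seq_changes_spec : Claim_equal_find_seq_changes := by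
  intro o s t _
  unfold Spec_find_seq_changes find_seq_changes find_seq_changes_alt
  simp only [pvAList_eq, pvOccurrences_eq]
  set io := (pvNaive o.toList t.toList).map (fun k : Nat => (k : Int)) with hio
  set ip := (pvNaive s.toList t.toList).map (fun k : Nat => (k : Int)) with hip
  have hios : io.Pairwise (· < ·) := pvCast_sorted _ (pvNaive_sorted _ _)
  have hips : ip.Pairwise (· < ·) := pvCast_sorted _ (pvNaive_sorted _ _)
  by_cases hlen : ip.length ≤ io.length
  · rw [if_pos hlen, if_neg (by omega)]
    rw [pvDiffMerge_eq io ip hips hios]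
    apply List.filter_congr
    intro x _
    have := PySem.Set.mem_ofList (xs := ip) (y := x)
    simp [PySem.Set.contains, this]
  · rw [if_neg hlen, if_pos (by omega)]
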